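-- pv_equiv track=rewrite | github.com/qsdrqs/dotfiles | tools/split_plugins.py | match_long_bracket
-- ===== SOURCE A (Python) =====
-- def match_long_bracket(source: str, pos: int) -> tuple[int, int] | None:
--     if pos >= len(source) or source[pos] != "[":
--         return None
--     idx = pos + 1
--     depth = 0
--     while idx < len(source) and source[idx] == "=":
--         depth += 1
--         idx += 1
--     if idx < len(source) and source[idx] == "[":
--         return depth, idx + 1
--     return None
-- ===== SOURCE B (Python) =====
-- def match_long_bracket(source: str, pos: int) -> tuple[int, int] | None:
--     if pos < 0 or pos >= len(source) or source[pos] != "[":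
--         return None
--     rest = source[pos + 1:]
--     stripped = rest.lstrip("=")
--     depth = len(rest) - len(stripped)
--     if stripped.startswith("["):
--         return depth, pos + 2 + depth
--     return None
-- ===== Notes on version B (the rewrite author's own statement) =====
-- stated objective: idiomatic
-- what changed: Replaces the per-character while-loop counter with a slice: measure the '=' run as len(rest) - len(rest.lstrip('=')) and check the closing '[' with startswith, computing the result position arithmetically.
-- outside the precondition, e.g. on match_long_bracket('[[', -2): A returns (0, 0), B returns None
import Mathlib
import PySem

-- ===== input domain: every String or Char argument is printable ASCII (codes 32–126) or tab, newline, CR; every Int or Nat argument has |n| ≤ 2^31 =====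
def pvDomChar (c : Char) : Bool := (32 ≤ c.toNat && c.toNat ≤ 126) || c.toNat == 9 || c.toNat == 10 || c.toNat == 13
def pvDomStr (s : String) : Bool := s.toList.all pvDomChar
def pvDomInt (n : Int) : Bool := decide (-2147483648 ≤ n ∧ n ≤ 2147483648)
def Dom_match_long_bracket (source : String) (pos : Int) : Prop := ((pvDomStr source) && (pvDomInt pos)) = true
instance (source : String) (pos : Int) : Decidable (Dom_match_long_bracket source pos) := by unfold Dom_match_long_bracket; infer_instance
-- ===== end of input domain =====

-- B replaces A's per-character while-loop with a slice-based measurement of the '=' run (more idiomatic, same cost).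


-- ===== PORT A =====
-- the while-loop of A: scan '=' characters, counting depth
def mlbLoopA (cs : List Char) (idx depth : Int) : Int × Int :=
  if h : idx < (cs.length : Int) ∧ PySem.List.pyGet? cs idx = some '=' then
    mlbLoopA cs (idx + 1) (depth + 1)
  else (depth, idx)
termination_by ((cs.length : Int) - idx).toNat
decreasing_by omega

def match_long_bracket (source : String) (pos : Int) : Option (Int × Int) :=
  let cs := source.toList
  if pos ≥ (cs.length : Int) then none
  else if PySem.List.pyGet? cs pos ≠ some '[' then none   -- pyGet? none = IndexError (pos < -len), excluded by Pre_
  else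
    let r := mlbLoopA cs (pos + 1) 0
    if r.2 < (cs.length : Int) ∧ PySem.List.pyGet? cs r.2 = some '[' then
      some (r.1, r.2 + 1)
    else none

-- ===== PORT B =====
-- lstrip("=") is ported by hand as dropWhile (· == '='), startswith("[") as head? = some '[': exact on this domain.
def match_long_bracket_alt (source : String) (pos : Int) : Option (Int × Int) :=
  let cs := source.toList
  if pos < 0 ∨ pos ≥ (cs.length : Int) ∨ PySem.List.pyGet? cs pos ≠ some '[' then none
  else
    let rest := PySem.List.slice cs (some (pos + 1)) none
    let stripped := rest.dropWhile (· == '=')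
    let depth : Int := (rest.length : Int) - (stripped.length : Int)
    if stripped.head? = some '[' then some (depth, pos + 2 + depth)
    else none

-- ===== PRECONDITION & SPEC =====
-- Pre_ restricts to 0 ≤ pos: a negative position is outside the parser's natural domain — there A raises
-- IndexError (pos < -len) or returns values via Python's negative-index wraparound, while B returns None.
def Pre_match_long_bracket (source : String) (pos : Int) : Prop := 0 ≤ pos
instance (source : String) (pos : Int) : Decidable (Pre_match_long_bracket source pos) := by unfold Pre_match_long_bracket; infer_instance
def pvWitness_match_long_bracket : String × Int := ("[==[x", 0)
def Spec_match_long_bracket (source : String) (pos : Int) (out : Option (Int × Int)) : Prop := out = match_long_bracket_alt source pos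
instance (source : String) (pos : Int) (out : Option (Int × Int)) : Decidable (Spec_match_long_bracket source pos out) := by unfold Spec_match_long_bracket; infer_instance

-- ===== CLAIM (what is proved, stated in full; the proofs are below) =====
def Claim_equal_match_long_bracket : Prop := ∀ (source : String) (pos : Int), Dom_match_long_bracket source pos → Pre_match_long_bracket source pos → Spec_match_long_bracket source pos (match_long_bracket source pos)

-- ===== LEMMAS AND PROOFS =====

lemma tw_le (p : Char → Bool) (l : List Char) : (l.takeWhile p).length ≤ l.length := by
  induction l with
  | nil => simp
  | cons a l ih =>
    rw [List.takeWhile_cons]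
    by_cases h : p a
    · simp only [h, if_true, List.length_cons]; omega
    · simp [h]

lemma dw_eq (p : Char → Bool) (l : List Char) : l.dropWhile p = l.drop (l.takeWhile p).length := by
  induction l with
  | nil => rfl
  | cons a l ih =>
    rw [List.dropWhile_cons, List.takeWhile_cons]
    by_cases h : p a
    · simp [h, ih]
    · simp [h]

-- characterisation of A's while-loop: it counts the '=' run starting at k
lemma mlbLoopA_eq (cs : List Char) : ∀ (n k : Nat) (depth : Int), cs.length - k ≤ n →
    mlbLoopA cs (k : Int) depth =
      (depth + (((cs.drop k).takeWhile (· == '=')).length : Int),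
       (k : Int) + (((cs.drop k).takeWhile (· == '=')).length : Int)) := by
  intro n
  induction n with
  | zero =>
    intro k depth h
    have hk : cs.length ≤ k := by omega
    rw [mlbLoopA]
    rw [dif_neg (by simp; intro h'; omega)]
    simp [List.drop_of_length_le hk]
  | succ n ih =>
    intro k depth h
    by_cases hc : (k : Int) < (cs.length : Int) ∧ PySem.List.pyGet? cs (k : Int) = some '='
    · have hk : k < cs.length := by exact_mod_cast hc.1
      have hget : cs[k] = '=' := by
        have h2' := hc.2
        rw [PySem.List.pyGet?_ofNat cs k hk] at h2'
        exact Option.some.inj h2'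
      rw [mlbLoopA, dif_pos hc]
      have hk1 : (k : Int) + 1 = ((k + 1 : Nat) : Int) := by push_cast; ring
      rw [hk1, ih (k + 1) (depth + 1) (by omega)]
      rw [List.drop_eq_getElem_cons hk, hget, List.takeWhile_cons]
      simp only [beq_self_eq_true, if_true, List.length_cons, Prod.mk.injEq]
      constructor <;> push_cast <;> ring
    · rw [mlbLoopA, dif_neg hc]
      have hempty : (cs.drop k).takeWhile (· == '=') = [] := by
        by_cases hk : k < cs.length
        · rw [List.drop_eq_getElem_cons hk, List.takeWhile_cons]
          have hne : cs[k] ≠ '=' := by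
            intro he
            exact hc ⟨by exact_mod_cast hk, by rw [PySem.List.pyGet?_ofNat cs k hk, he]⟩
          simp [hne]
        · rw [List.drop_of_length_le (by omega)]
          rfl
      simp [hempty]

-- ===== VERDICT (by name: the statement is the Claim_ definition above) =====
theorem match_long_bracket_spec : Claim_equal_match_long_bracket := by
  intro source pos _hdom hpre
  have hpos : 0 ≤ pos := hpre
  unfold Spec_match_long_bracket match_long_bracket match_long_bracket_alt
  set cs := source.toList with hcs
  by_cases h1 : pos ≥ (cs.length : Int)
  · rw [if_pos h1, if_pos (Or.inr (Or.inl h1))]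
  · rw [if_neg h1]
    by_cases h2 : PySem.List.pyGet? cs pos ≠ some '['
    · rw [if_pos h2, if_pos (Or.inr (Or.inr h2))]
    · rw [if_neg h2]
      obtain ⟨k, rfl⟩ : ∃ k : Nat, pos = (k : Int) := ⟨pos.toNat, by omega⟩
      rw [if_neg (show ¬((k : Int) < 0 ∨ (k : Int) ≥ (cs.length : Int) ∨ PySem.List.pyGet? cs (k : Int) ≠ some '[') from by
        simp only [not_or]
        exact ⟨by omega, h1, h2⟩)]
      have hk1 : (k : Int) + 1 = ((k + 1 : Nat) : Int) := by push_cast; ring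
      have hloop := mlbLoopA_eq cs cs.length (k + 1) 0 (by omega)
      rw [← hk1] at hloop
      rw [show PySem.List.slice cs (some ((k : Int) + 1)) none = cs.drop (k + 1) from by
        rw [hk1]; exact PySem.List.slice_from_natCast cs (k + 1)]
      set rest := cs.drop (k + 1) with hrestdef
      set t := (rest.takeWhile (· == '=')).length with ht
      have hloop2 : mlbLoopA cs ((k : Int) + 1) 0 = ((t : Int), (k : Int) + 1 + (t : Int)) := by
        rw [hloop]; norm_num
      rw [hloop2]
      dsimp only
      have hstr : rest.dropWhile (· == '=') = cs.drop (k + 1 + t) := by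
        rw [dw_eq, ← ht, hrestdef, List.drop_drop]
      rw [hstr]
      have htle : t ≤ rest.length := by rw [ht]; exact tw_le _ _
      have hlenrest : rest.length = cs.length - (k + 1) := by
        rw [hrestdef, List.length_drop]
      have hdepth : (rest.length : Int) - (((cs.drop (k + 1 + t)).length : Int)) = (t : Int) := by
        have hd2 : (List.drop (k + 1 + t) cs).length = cs.length - (k + 1 + t) := List.length_drop ..
        omega
      rw [hdepth, List.head?_drop]
      have hcast : (k : Int) + 1 + (t : Int) = ((k + 1 + t : Nat) : Int) := by push_cast; ring
      by_cases h3 : cs[k + 1 + t]? = some '['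
      · have hlt : k + 1 + t < cs.length := by
          by_contra hge
          rw [List.getElem?_eq_none (by omega : cs.length ≤ k + 1 + t)] at h3
          cases h3
        rw [if_pos h3]
        rw [if_pos (show (k : Int) + 1 + (t : Int) < (cs.length : Int) ∧
              PySem.List.pyGet? cs ((k : Int) + 1 + (t : Int)) = some '[' from
          ⟨by omega, by rw [hcast, PySem.List.pyGet?_natCast]; exact h3⟩)]
        simp only [Option.some.injEq, Prod.mk.injEq]
        exact ⟨trivial, by ring⟩
      · rw [if_neg h3]
        rw [if_neg (show ¬((k : Int) + 1 + (t : Int) < (cs.length : Int) ∧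
              PySem.List.pyGet? cs ((k : Int) + 1 + (t : Int)) = some '[') from by
          rintro ⟨hlt', hget'⟩
          apply h3
          rw [hcast, PySem.List.pyGet?_natCast] at hget'
          exact hget')]
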